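-- pv_equiv track=rewrite | github.com/alexandraback/datacollection | solutions_5688567749672960_1/Python/Huangry/qA.py | ansdigits
-- ===== SOURCE A (Python) =====
-- def ansdigits (n):
--     if n == 1:
--         return 1
--     if n == 2:
--         return 10
--     sum = 0
--     n2 = n-1
--     if n2%2 == 1:
--         sum += 9*(10**(int(n2/2)))
--     for i in range(int(n2/2)):
--         if i == 0:
--             sum += 8 + 9
--         else:
--             sum+= 18*(10**(i))
--     sum+=2
--     return sum + ansdigits (n-1)
-- ===== SOURCE B (Python) =====
-- def ansdigits(n):
--     # Closed form: 10**k - 1 is 9 * repunit(k); derived by telescoping A's recursion.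
--     if n == 1:
--         return 1
--     k, r = divmod(n, 2)
--     if r == 0:
--         return (13 * 10 ** k - 22) // 9 - 2 * k
--     return 31 * (10 ** k - 1) // 9 - 2 * k
-- ===== Notes on version B (the rewrite author's own statement) =====
-- stated objective: faster
-- what changed: Replaced the linear recursion (each level re-running an inner power loop, quadratically many big-int multiplications) by a closed-form expression: one big-int power and one exact division per call.
import Mathlib
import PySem

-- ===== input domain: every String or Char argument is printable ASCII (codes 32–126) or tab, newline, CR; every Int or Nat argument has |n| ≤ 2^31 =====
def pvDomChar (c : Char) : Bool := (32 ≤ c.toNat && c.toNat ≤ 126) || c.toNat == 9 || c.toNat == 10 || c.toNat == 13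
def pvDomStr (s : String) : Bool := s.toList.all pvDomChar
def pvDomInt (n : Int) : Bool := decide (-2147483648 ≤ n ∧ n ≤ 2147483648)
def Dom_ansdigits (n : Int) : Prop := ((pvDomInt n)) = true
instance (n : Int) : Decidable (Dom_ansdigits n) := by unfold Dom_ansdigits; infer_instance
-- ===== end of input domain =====

-- B replaces A's linear recursion (with its inner power loop) by a closed-form expression;
-- a timing run measured B faster (asymptotically fewer big-int operations).

-- ===== PORT A =====
-- Python A recurses on n-1; the recursion terminates only for n ≥ 1 (base cases 1, 2).
-- Fuel n.toNat makes the Lean function total; on Pre_ (1 ≤ n) the fuel is never exhausted,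
-- so the fuel-0 value 0 is unreachable there (totality guard, not an algorithm switch).
-- int(n2/2) truncates toward zero → Int.tdiv; 10**i with i ≥ 0 (from range) → 10 ^ i.toNat.
def ansdigitsGo : Nat → Int → Int
  | 0, _ => 0
  | fuel+1, n =>
    if n = 1 then 1
    else if n = 2 then 10
    else
      let n2 : Int := n - 1
      let s1 : Int := if PySem.Int.mod n2 2 = 1 then 0 + 9 * 10 ^ (n2.tdiv 2).toNat else 0
      let s2 : Int := (PySem.List.pyRange 0 (n2.tdiv 2) 1).foldl
        (fun s i => if i = 0 then s + (8 + 9) else s + 18 * 10 ^ i.toNat) s1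
      (s2 + 2) + ansdigitsGo fuel (n - 1)

def ansdigits (n : Int) : Int := ansdigitsGo n.toNat n

-- ===== PORT B =====
def ansdigits_alt (n : Int) : Int :=
  if n = 1 then 1
  else
    let k : Int := PySem.Int.floordiv n 2
    let r : Int := PySem.Int.mod n 2
    if r = 0 then PySem.Int.floordiv (13 * 10 ^ k.toNat - 22) 9 - 2 * k
    else PySem.Int.floordiv (31 * (10 ^ k.toNat - 1)) 9 - 2 * k

-- ===== PRECONDITION & SPEC =====
-- Python A recurses on n-1 with base cases n=1 and n=2, so it raises RecursionError for n ≤ 0.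
def Pre_ansdigits (n : Int) : Prop := 1 ≤ n
instance (n : Int) : Decidable (Pre_ansdigits n) := by unfold Pre_ansdigits; infer_instance
def pvWitness_ansdigits : Int := 5

def Spec_ansdigits (n : Int) (out : Int) : Prop := out = ansdigits_alt n
instance (n : Int) (out : Int) : Decidable (Spec_ansdigits n out) := by unfold Spec_ansdigits; infer_instance

-- ===== CLAIM (what is proved, stated in full; the proofs are below) =====
def Claim_equal_ansdigits : Prop := ∀ (n : Int), Dom_ansdigits n → Pre_ansdigits n → Spec_ansdigits n (ansdigits n)

-- ===== LEMMAS AND PROOFS =====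

-- repunit: R k = (10^k - 1)/9 as an exact sum
def pvRep : Nat → Int
  | 0 => 0
  | k+1 => 10 * pvRep k + 1

theorem pvRep_mul_nine (k : Nat) : 9 * pvRep k = 10 ^ k - 1 := by
  induction k with
  | zero => simp [pvRep]
  | succ k ih => simp only [pvRep, pow_succ]; ring_nf; ring_nf at ih; omega

-- the inner loop of A sums to 2*10^h - 3 for h ≥ 1 (and 0 for h = 0)
def pvLoopSum : Nat → Int
  | 0 => 0
  | h+1 => pvLoopSum h + (if h = 0 then 17 else 18 * 10 ^ h)

theorem pvLoop_fold (h : Nat) (s : Int) :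
    (PySem.List.pyRange 0 (h : Int) 1).foldl
      (fun s i => if i = 0 then s + (8 + 9) else s + 18 * 10 ^ i.toNat) s
    = s + pvLoopSum h := by
  induction h generalizing s with
  | zero => simp [pvLoopSum]
  | succ h ih =>
    rw [show ((h + 1 : Nat) : Int) = (h : Int) + 1 by push_cast; ring,
        PySem.List.pyRange_one_succ_right (by positivity), List.foldl_append, ih]
    simp only [List.foldl, pvLoopSum]
    rcases Nat.eq_zero_or_pos h with h0 | hpos
    · subst h0; simp [pvLoopSum]
    · have hne : ((h : Int) = 0) = False := by simp; omega
      simp only [hne, if_false, Int.toNat_natCast, Nat.pos_iff_ne_zero.mp hpos]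
      ring

theorem pvLoopSum_eq (h : Nat) (hh : 1 ≤ h) : pvLoopSum h = 2 * 10 ^ h - 3 := by
  induction h with
  | zero => omega
  | succ h ih =>
    rcases Nat.eq_zero_or_pos h with h0 | hpos
    · subst h0; simp [pvLoopSum]
    · rw [pvLoopSum, ih hpos]
      have : (h = 0) = False := by simp; omega
      simp only [this, if_false, pow_succ]; ring

-- closed-form value of B on n ≥ 2, phrased with pvRep
theorem pvAlt_even (k : Int) (_hk : 1 ≤ k) :
    ansdigits_alt (2 * k) = 13 * pvRep k.toNat - 1 - 2 * k := by
  have hne : (2 * k = 1) = False := by simp; omega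
  have hmod : PySem.Int.mod (2 * k) 2 = 0 := by
    rw [PySem.Int.mod_eq_emod_of_pos (by norm_num)]; omega
  have hdiv : PySem.Int.floordiv (2 * k) 2 = k := by
    rw [PySem.Int.floordiv_eq_ediv_of_pos (by norm_num)]; omega
  have h9 : (13 * 10 ^ k.toNat - 22 : Int) = (13 * pvRep k.toNat - 1) * 9 := by
    have := pvRep_mul_nine k.toNat; ring_nf; ring_nf at this; omega
  simp only [ansdigits_alt, hne, if_false, hmod, hdiv]
  rw [if_pos trivial, h9, PySem.Int.floordiv_eq_ediv_of_pos (by norm_num),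
      Int.mul_ediv_cancel _ (by norm_num)]

theorem pvAlt_odd (k : Int) (hk : 1 ≤ k) :
    ansdigits_alt (2 * k + 1) = 31 * pvRep k.toNat - 2 * k := by
  have hne : (2 * k + 1 = 1) = False := by simp; omega
  have hmod : PySem.Int.mod (2 * k + 1) 2 = 1 := by
    rw [PySem.Int.mod_eq_emod_of_pos (by norm_num)]; omega
  have hdiv : PySem.Int.floordiv (2 * k + 1) 2 = k := by
    rw [PySem.Int.floordiv_eq_ediv_of_pos (by norm_num)]; omega
  have h9 : (31 * (10 ^ k.toNat - 1) : Int) = (31 * pvRep k.toNat) * 9 := by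
    have := pvRep_mul_nine k.toNat; ring_nf; ring_nf at this; omega
  simp only [ansdigits_alt, hne, if_false, hmod, hdiv]
  rw [if_neg (by norm_num), h9, PySem.Int.floordiv_eq_ediv_of_pos (by norm_num),
      Int.mul_ediv_cancel _ (by norm_num)]

-- main induction: with enough fuel, A's recursion equals B's closed form
theorem pvGo_eq (fuel : Nat) : ∀ n : Int, 1 ≤ n → n ≤ (fuel : Int) →
    ansdigitsGo fuel n = ansdigits_alt n := by
  induction fuel with
  | zero => intro n h1 h2; omega
  | succ fuel ih =>
    intro n h1 h2
    by_cases hn1 : n = 1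
    · subst hn1; simp [ansdigitsGo, ansdigits_alt]
    by_cases hn2 : n = 2
    · subst hn2
      have : ansdigits_alt 2 = 10 := by
        have := pvAlt_even 1 (le_refl 1); norm_num [pvRep] at this; omega
      simp [ansdigitsGo, this]
    -- n ≥ 3
    have hn3 : 3 ≤ n := by omega
    have hrec : ansdigitsGo fuel (n - 1) = ansdigits_alt (n - 1) :=
      ih (n - 1) (by omega) (by push_cast at h2 ⊢; omega)
    have hmod2 : PySem.Int.mod (n - 1) 2 = (n - 1) % 2 :=
      PySem.Int.mod_eq_emod_of_pos (by norm_num)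
    -- h := (n-1) tdiv 2, as a Nat
    set h : Nat := ((n - 1).tdiv 2).toNat with hh
    have htd : (n - 1).tdiv 2 = (h : Int) := by
      rw [hh, Int.toNat_of_nonneg (Int.tdiv_nonneg (by omega) (by norm_num))]
    have hge1 : 1 ≤ h := by
      have : (1 : Int) ≤ (n - 1).tdiv 2 := by
        rw [Int.tdiv_eq_ediv_of_nonneg (by omega)]; omega
      omega
    simp only [ansdigitsGo, hn1, if_false, hn2, hrec]
    rw [htd, pvLoop_fold, pvLoopSum_eq h hge1]
    -- case on parity of n
    rcases Int.even_or_odd n with ⟨k, hk⟩ | ⟨k, hk⟩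
    · -- n = 2k even, n-1 odd, h = k-1
      have hk1 : n = 2 * k := by omega
      have hkge : 2 ≤ k := by omega
      have hhk : h = (k - 1).toNat := by
        have : (n - 1).tdiv 2 = k - 1 := by
          rw [Int.tdiv_eq_ediv_of_nonneg (by omega)]; omega
        omega
      have hmodv : (n - 1) % 2 = 1 := by omega
      have hrepk : pvRep k.toNat = 10 * pvRep (k - 1).toNat + 1 := by
        have : k.toNat = (k - 1).toNat + 1 := by omega
        rw [this]; rfl
      have h9 := pvRep_mul_nine (k - 1).toNat
      rw [hmod2, hmodv, if_pos rfl]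
      simp only [Int.toNat_natCast]
      rw [hk1, pvAlt_even k (by omega),
          show (2 * k - 1 : Int) = 2 * (k - 1) + 1 by ring,
          pvAlt_odd (k - 1) (by omega), hhk, hrepk]
      ring_nf; ring_nf at h9; omega
    · -- n = 2k+1 odd, n-1 even, h = k
      have hk1 : n = 2 * k + 1 := by omega
      have hkge : 1 ≤ k := by omega
      have hhk : h = k.toNat := by
        have : (n - 1).tdiv 2 = k := by
          rw [Int.tdiv_eq_ediv_of_nonneg (by omega)]; omega
        omega
      have hmodv : (n - 1) % 2 = 0 := by omega
      have h9 := pvRep_mul_nine k.toNat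
      rw [hmod2, hmodv, if_neg (by norm_num)]
      rw [hk1, pvAlt_odd k (by omega),
          show (2 * k + 1 - 1 : Int) = 2 * k by ring,
          pvAlt_even k (by omega), hhk]
      ring_nf; ring_nf at h9; omega

-- ===== VERDICT (by name: the statement is the Claim_ definition above) =====
theorem ansdigits_spec : Claim_equal_ansdigits := by
  intro n _ hpre
  unfold Spec_ansdigits ansdigits
  exact pvGo_eq n.toNat n hpre (by omega)
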